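-- pv_equiv track=rewrite | github.com/spurtzel/DSS | plan_generator/plan_generator_sensitivity_experiment.py | find_inclusion_maximal_subsets
-- ===== SOURCE A (Python) =====
-- def find_inclusion_maximal_subsets(strings):
--     result = {}
--
--     strings = sorted(strings, key=len)
--     added = []
--     for s in strings:
--
--         result[s] = []
--         for candidate in strings:
--             if candidate != s and candidate in s and candidate not in added:
--                 result[s].append(candidate)
--                 added.append(candidate)
--
--     return result
-- ===== SOURCE B (Python) =====
-- def find_inclusion_maximal_subsets(strings):
--     order = sorted(strings, key=len)
--     distinct = list(dict.fromkeys(order))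
--     owner = {}
--     for c in distinct:
--         for i, s in enumerate(order):
--             if c != s and c in s:
--                 owner[c] = i
--                 break
--     result = {}
--     for k, s in enumerate(order):
--         result[s] = [c for c in distinct if owner.get(c) == k]
--     return result
-- ===== Notes on version B (the rewrite author's own statement) =====
-- stated objective: alternative
-- what changed: B transposes A's nested loops: instead of scanning candidates per string while maintaining a shared mutable `added` list, B precomputes each distinct candidate's unique owner (the first sorted string strictly containing it, found with an early-exit scan) into a dict, then builds every result list by filtering the distinct candidates on that owner index.
import Mathlib
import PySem

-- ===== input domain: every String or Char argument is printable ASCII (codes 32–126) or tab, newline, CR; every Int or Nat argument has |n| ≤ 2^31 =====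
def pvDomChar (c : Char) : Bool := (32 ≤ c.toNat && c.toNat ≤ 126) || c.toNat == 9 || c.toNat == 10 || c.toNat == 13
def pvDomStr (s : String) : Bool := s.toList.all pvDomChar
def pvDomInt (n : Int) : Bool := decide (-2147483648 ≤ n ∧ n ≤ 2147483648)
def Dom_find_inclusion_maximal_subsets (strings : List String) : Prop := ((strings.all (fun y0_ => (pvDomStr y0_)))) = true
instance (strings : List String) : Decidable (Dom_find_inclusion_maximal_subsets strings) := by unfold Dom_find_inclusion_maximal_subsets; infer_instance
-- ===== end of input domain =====

-- B replaces A's global `added` accumulator by a transposed decomposition: it precomputes each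
-- distinct candidate's unique owner (the first sorted string strictly containing it) in a dict,
-- then builds each result list by filtering on that owner index; objective: alternative.


-- ===== PORT A =====
-- inner loop body: `if candidate != s and candidate in s and candidate not in added: result[s].append(candidate); added.append(candidate)`
def pvInnerStep (s : String) (st2 : PySem.Dict String (List String) × List String)
    (candidate : String) : PySem.Dict String (List String) × List String :=
  if candidate ≠ s ∧ PySem.Str.isIn candidate s ∧ candidate ∉ st2.2 then
    (st2.1.modify s [] (· ++ [candidate]), st2.2 ++ [candidate])
  else st2

-- outer loop body: `result[s] = []` then the inner `for candidate in strings` loop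
def pvOuterStep (ss : List String) (st : PySem.Dict String (List String) × List String)
    (s : String) : PySem.Dict String (List String) × List String :=
  ss.foldl (pvInnerStep s) (st.1.insert s [], st.2)

def find_inclusion_maximal_subsets (strings : List String) : List (String × List String) :=
  let strings := PySem.List.sorted strings (fun s => PySem.Str.len s)
  (strings.foldl (pvOuterStep strings) (PySem.Dict.empty, [])).1.items

-- ===== PORT B =====
-- `for i, s in enumerate(order): if c != s and c in s: owner[c] = i; break`
def pvOwnerFind (order : List String) (c : String) : Option (Int × String) :=
  (PySem.List.enumerate order).find? (fun p => decide (c ≠ p.2) && PySem.Str.isIn c p.2)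

def pvOwnerStep (order : List String) (d : PySem.Dict String Int) (c : String) :
    PySem.Dict String Int :=
  match pvOwnerFind order c with
  | some p => d.insert c p.1
  | none => d

-- `result[s] = [c for c in distinct if owner.get(c) == k]`
def pvResultStep (distinct : List String) (owner : PySem.Dict String Int)
    (d : PySem.Dict String (List String)) (p : Int × String) :
    PySem.Dict String (List String) :=
  d.insert p.2 (distinct.filter (fun c => owner.get? c == some p.1))

def find_inclusion_maximal_subsets_alt (strings : List String) : List (String × List String) :=
  let order := PySem.List.sorted strings (fun s => PySem.Str.len s)
  let distinct := PySem.List.dedup order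
  let owner := distinct.foldl (pvOwnerStep order) PySem.Dict.empty
  ((PySem.List.enumerate order).foldl (pvResultStep distinct owner) PySem.Dict.empty).items

-- ===== PRECONDITION & SPEC =====
def Spec_find_inclusion_maximal_subsets (strings : List String) (out : List (String × List String)) : Prop := out = find_inclusion_maximal_subsets_alt strings
instance (strings : List String) (out : List (String × List String)) : Decidable (Spec_find_inclusion_maximal_subsets strings out) := by unfold Spec_find_inclusion_maximal_subsets; infer_instance

-- ===== CLAIM (what is proved, stated in full; the proofs are below) =====
def Claim_equal_find_inclusion_maximal_subsets : Prop := ∀ (strings : List String), Dom_find_inclusion_maximal_subsets strings → Spec_find_inclusion_maximal_subsets strings (find_inclusion_maximal_subsets strings)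

-- ===== LEMMAS AND PROOFS =====

-- the Bool form of the candidate condition shared by both loops
def pvCond (c s : String) : Bool := decide (c ≠ s) && PySem.Str.isIn c s

-- what A's inner loop appends: candidates in list order, claimed at most once, skipping `added`
def pvClaim (s : String) : List String → List String → List String
  | [], _ => []
  | c :: cs, ad => if c ≠ s ∧ PySem.Str.isIn c s ∧ c ∉ ad then c :: pvClaim s cs (ad ++ [c])
                   else pvClaim s cs ad


lemma pv_inner_eq (s : String) (cs : List String) (d : PySem.Dict String (List String))
    (cur ad : List String) :
    cs.foldl (pvInnerStep s) (d.insert s cur, ad)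
      = (d.insert s (cur ++ pvClaim s cs ad), ad ++ pvClaim s cs ad) := by
  induction cs generalizing cur ad with
  | nil => simp [pvClaim]
  | cons c cs ih =>
    simp only [List.foldl_cons, pvInnerStep, pvClaim]
    by_cases h : c ≠ s ∧ PySem.Str.isIn c s ∧ c ∉ ad
    · rw [if_pos h, if_pos h]
      have hm : (d.insert s cur).modify s [] (· ++ [c]) = d.insert s (cur ++ [c]) := by
        simp [PySem.Dict.modify, PySem.Dict.getD_insert_self, PySem.Dict.insert_insert_self]
      rw [hm, ih]
      simp
    · rw [if_neg h, if_neg h, ih]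

lemma pv_foldl_add_acc (cs acc : List String) :
    cs.foldl PySem.Set.add acc
      = acc ++ (cs.foldl PySem.Set.add []).filter (fun x => !acc.contains x) := by
  induction cs generalizing acc with
  | nil => simp
  | cons c cs ih =>
    simp only [List.foldl_cons]
    rw [ih (PySem.Set.add acc c), ih (PySem.Set.add [] c)]
    simp only [PySem.Set.add, PySem.Set.contains]
    by_cases h : c ∈ acc
    · simp only [if_pos (by simp [h] : acc.contains c = true)]
      simp [h]
      apply List.filter_congr
      intro x _
      by_cases hx : x ∈ acc
      · simp [hx]
      · simp [hx]
        rintro rfl; exact absurd h hx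
    · simp only [if_neg (by simp [h] : ¬ acc.contains c = true), if_neg (by simp : ¬ List.contains [] c = true)]
      simp [h]

lemma pv_dedup_cons (c : String) (cs : List String) :
    PySem.List.dedup (c :: cs) = c :: (PySem.List.dedup cs).filter (fun x => !(x == c)) := by
  have h1 : PySem.List.dedup (c :: cs) = (c :: cs).foldl PySem.Set.add [] := by
    simp [PySem.List.dedup, PySem.Set.ofList_eq_foldl]
  have h2 : PySem.List.dedup cs = cs.foldl PySem.Set.add [] := by
    simp [PySem.List.dedup, PySem.Set.ofList_eq_foldl]
  rw [h1, h2]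
  simp only [List.foldl_cons]
  have : PySem.Set.add ([] : List String) c = [c] := by simp [PySem.Set.add, PySem.Set.contains]
  rw [this, pv_foldl_add_acc cs [c]]
  simp
  apply List.filter_congr
  intro x _
  cases hx : x == c <;> simp_all

lemma pv_claim_eq_filter (s : String) (cs ad : List String) :
    pvClaim s cs ad
      = (PySem.List.dedup cs).filter (fun c => pvCond c s && !ad.contains c) := by
  induction cs generalizing ad with
  | nil => simp [pvClaim, PySem.List.dedup]
  | cons c cs ih =>
    rw [pv_dedup_cons, List.filter_cons]
    by_cases h : c ≠ s ∧ PySem.Str.isIn c s ∧ c ∉ ad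
    · have hp : (pvCond c s && !ad.contains c) = true := by
        have h3 : ad.contains c = false := by simpa using h.2.2
        simp only [pvCond, h3, Bool.not_false, Bool.and_true, Bool.and_eq_true,
          decide_eq_true_eq]
        exact ⟨h.1, h.2.1⟩
      rw [if_pos hp]
      show pvClaim s (c :: cs) ad = _
      rw [pvClaim, if_pos h, ih]
      congr 1
      rw [List.filter_filter]
      apply List.filter_congr
      intro x _
      by_cases hx : x = c <;> by_cases ha : x ∈ ad <;> simp [hx, ha, pvCond]
    · have hp : ¬ ((pvCond c s && !ad.contains c) = true) := by
        simp only [pvCond, Bool.and_eq_true, decide_eq_true_eq, Bool.not_eq_true',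
          List.contains_eq_mem, decide_eq_false_iff_not, not_and]
        intro h1 h2
        exact h ⟨h1.1, h1.2, h2⟩
      rw [if_neg hp]
      show pvClaim s (c :: cs) ad = _
      rw [pvClaim, if_neg h, ih]
      rw [List.filter_filter]
      apply List.filter_congr
      intro x _
      by_cases hx : x = c
      · subst hx
        simp only [beq_self_eq_true, Bool.not_true, Bool.and_false]
        simpa using hp
      · simp [hx]

lemma pv_ownerFind_eq_some_iff (L : List String) (c : String) (k : Nat) (hk : k < L.length) :
    (pvOwnerFind L c).map (·.1) = some (k : Int)
      ↔ (pvCond c L[k] = true ∧ ∀ j (hj : j < k), pvCond c (L[j]'(hj.trans hk)) = false) := by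
  have hlen : (PySem.List.enumerate L).length = L.length := by
    simp [PySem.List.length_enumerate]
  constructor
  · intro h
    cases hf : pvOwnerFind L c with
    | none => simp [hf] at h
    | some b =>
      rw [hf] at h
      simp only [Option.map_some, Option.some.injEq] at h
      rw [pvOwnerFind, List.find?_eq_some_iff_getElem] at hf
      obtain ⟨hq, i, hi, hgb, hprev⟩ := hf
      have hiL : i < L.length := by omega
      rw [PySem.List.getElem_enumerate] at hgb
      have hb1 : b.1 = (i : Int) := by rw [← hgb]; simp
      have hik : i = k := by
        have : ((i : Int)) = (k : Int) := by rw [← hb1, h]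
        exact_mod_cast this
      subst hik
      have hb2 : b.2 = L[i] := by rw [← hgb]
      constructor
      · rw [← hb2]; simpa [pvCond] using hq
      · intro j hj
        have := hprev j (by omega)
        rw [PySem.List.getElem_enumerate] at this
        have h' : c = L[j] ∨ PySem.Chars.isIn c.toList L[j].toList = false := by
          simpa using this
        simp only [pvCond, Bool.and_eq_false_iff]
        rcases h' with h' | h'
        · left; simp [h']
        · right; simpa using h'
  · rintro ⟨h1, h2⟩
    have : pvOwnerFind L c = some ((k : Int), L[k]) := by
      rw [pvOwnerFind, List.find?_eq_some_iff_getElem]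
      refine ⟨by simpa [pvCond] using h1, k, by omega, ?_, ?_⟩
      · rw [PySem.List.getElem_enumerate]; simp
      · intro j hj
        rw [PySem.List.getElem_enumerate]
        have := h2 j (by omega)
        simp only [pvCond, Bool.and_eq_false_iff] at this
        rcases this with h' | h'
        · simp at h'
          simp [h']
        · simp only [Bool.not_eq_true', Bool.and_eq_false_iff]
          exact Or.inr h'
    simp [this]

lemma pv_owner_get_of_not_mem (L cs : List String) (d : PySem.Dict String Int) (c : String)
    (hc : c ∉ cs) : (cs.foldl (pvOwnerStep L) d).get? c = d.get? c := by
  induction cs generalizing d with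
  | nil => rfl
  | cons c0 cs ih =>
    simp only [List.foldl_cons]
    rw [ih (pvOwnerStep L d c0) (by simp at hc; exact hc.2)]
    unfold pvOwnerStep
    cases pvOwnerFind L c0 with
    | none => rfl
    | some p => exact PySem.Dict.get?_insert_of_ne _ _ (by simp at hc; exact hc.1)

lemma pv_owner_get (L cs : List String) (d : PySem.Dict String Int) (c : String)
    (hc : c ∈ cs) (hnd : cs.Nodup) (hd : d.get? c = none) :
    (cs.foldl (pvOwnerStep L) d).get? c = (pvOwnerFind L c).map (·.1) := by
  induction cs generalizing d with
  | nil => simp at hc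
  | cons c0 cs ih =>
    simp only [List.foldl_cons]
    by_cases h : c = c0
    · subst h
      rw [pv_owner_get_of_not_mem L cs _ c (by simp at hnd; exact hnd.1)]
      unfold pvOwnerStep
      cases hf : pvOwnerFind L c with
      | none => simp [hd]
      | some p => simp [PySem.Dict.get?_insert_self]
    · have hc' : c ∈ cs := by rcases List.mem_cons.1 hc with h' | h'; exact absurd h' h; exact h'
      rw [ih _ hc' (by simp at hnd; exact hnd.2)]
      unfold pvOwnerStep
      cases pvOwnerFind L c0 with
      | none => exact hd
      | some p => rw [PySem.Dict.get?_insert_of_ne _ _ h]; exact hd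

lemma pv_main (L : List String) (ls : List String) (k : Nat) (hls : L.drop k = ls)
    (d : PySem.Dict String (List String)) (ad : List String)
    (had : ∀ c, c ∈ ad ↔ (c ∈ L ∧ ∃ j, ∃ _ : j < k, ∃ hj : j < L.length, pvCond c (L[j]'hj) = true)) :
    (ls.foldl (pvOuterStep L) (d, ad)).1
      = ((PySem.List.enumerate L).drop k).foldl
          (pvResultStep (PySem.List.dedup L)
            ((PySem.List.dedup L).foldl (pvOwnerStep L) PySem.Dict.empty)) d := by
  induction ls generalizing k d ad with
  | nil =>
    have hk : L.length ≤ k := List.drop_eq_nil_iff.1 hls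
    have he : (PySem.List.enumerate L).drop k = [] := by
      rw [List.drop_eq_nil_iff]
      rw [PySem.List.length_enumerate]; exact hk
    rw [he]; rfl
  | cons s ls' ih =>
    have hk : k < L.length := by
      by_contra h
      rw [List.drop_eq_nil_iff.2 (by omega)] at hls
      exact (List.cons_ne_nil s ls') hls.symm
    rw [List.drop_eq_getElem_cons hk] at hls
    obtain ⟨hs, hls'⟩ : L[k] = s ∧ L.drop (k+1) = ls' := ⟨(List.cons.injEq _ _ _ _ ▸ hls).1, (List.cons.injEq _ _ _ _ ▸ hls).2⟩
    -- A side: one outer step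
    have hstep : pvOuterStep L (d, ad) s = (d.insert s (pvClaim s L ad), ad ++ pvClaim s L ad) := by
      unfold pvOuterStep
      have := pv_inner_eq s L d [] ad
      simpa using this
    -- B side: peel one enumerate element
    have henum : (PySem.List.enumerate L).drop k
        = ((k : Int), s) :: (PySem.List.enumerate L).drop (k+1) := by
      rw [List.drop_eq_getElem_cons (by rw [PySem.List.length_enumerate]; exact hk)]
      rw [PySem.List.getElem_enumerate]
      simp [hs]
    -- values agree
    have hval : pvClaim s L ad
        = (PySem.List.dedup L).filter (fun c =>
            ((PySem.List.dedup L).foldl (pvOwnerStep L) PySem.Dict.empty).get? c == some (k : Int)) := by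
      rw [pv_claim_eq_filter]
      apply List.filter_congr
      intro c hcmem
      have hcL : c ∈ L := (PySem.List.mem_dedup L c).1 hcmem
      have hnd : (PySem.List.dedup L).Nodup := PySem.Set.nodup_ofList L
      rw [pv_owner_get L _ _ c hcmem hnd (PySem.Dict.get?_empty c)]
      rw [Bool.eq_iff_iff]
      simp only [Bool.and_eq_true, Bool.not_eq_true', List.contains_eq_mem, decide_eq_false_iff_not,
        beq_iff_eq]
      rw [pv_ownerFind_eq_some_iff L c k hk]
      constructor
      · rintro ⟨h1, h2⟩
        refine ⟨by rwa [hs], ?_⟩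
        intro j hj
        by_contra hbad
        exact h2 ((had c).2 ⟨hcL, j, hj, hj.trans hk, by simpa using hbad⟩)
      · rintro ⟨h1, h2⟩
        refine ⟨by rwa [← hs], ?_⟩
        intro hmem
        obtain ⟨-, j, hj, hjL, hcond⟩ := (had c).1 hmem
        rw [h2 j hj] at hcond
        exact Bool.noConfusion hcond
    -- new invariant
    have had' : ∀ c, c ∈ ad ++ pvClaim s L ad ↔
        (c ∈ L ∧ ∃ j, ∃ _ : j < k + 1, ∃ hj : j < L.length, pvCond c (L[j]'hj) = true) := by
      intro c
      rw [List.mem_append, pv_claim_eq_filter, List.mem_filter]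
      constructor
      · rintro (hmem | ⟨hdd, hcnd⟩)
        · obtain ⟨hcL, j, hj, hjL, hcond⟩ := (had c).1 hmem
          exact ⟨hcL, j, by omega, hjL, hcond⟩
        · refine ⟨(PySem.List.mem_dedup L c).1 hdd, k, by omega, hk, ?_⟩
          rw [hs]
          simpa using (Bool.and_eq_true _ _ ▸ hcnd).1
      · rintro ⟨hcL, j, hj, hjL, hcond⟩
        by_cases hm : c ∈ ad
        · exact Or.inl hm
        · right
          refine ⟨(PySem.List.mem_dedup L c).2 hcL, ?_⟩
          have hj' : j = k ∨ j < k := by omega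
          rcases hj' with rfl | hj'
          · simp only [Bool.and_eq_true]
            refine ⟨by rwa [← hs], by simpa using hm⟩
          · exact absurd ((had c).2 ⟨hcL, j, hj', hjL, hcond⟩) hm
    -- assemble
    simp only [List.foldl_cons, hstep, henum]
    rw [ih (k+1) hls' _ _ had']
    congr 1
    unfold pvResultStep
    simp [hval]


-- ===== VERDICT (by name: the statement is the Claim_ definition above) =====
theorem find_inclusion_maximal_subsets_spec : Claim_equal_find_inclusion_maximal_subsets := by
  intro strings _
  unfold Spec_find_inclusion_maximal_subsets
  unfold find_inclusion_maximal_subsets find_inclusion_maximal_subsets_alt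
  have h := pv_main (PySem.List.sorted strings (fun s => PySem.Str.len s))
      (PySem.List.sorted strings (fun s => PySem.Str.len s)) 0 rfl PySem.Dict.empty []
      (by intro c; simp)
  simp only [List.drop_zero] at h
  exact congrArg PySem.Dict.items h
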